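-- pv_equiv track=rewrite | github.com/gameofdimension/mini-ddz | pve_server/deck.py | _action_to_suit_format
-- ===== SOURCE A (Python) =====
-- def _action_to_suit_format(action, player_hand_with_suits):
--     """Convert action to suit format using pre-assigned suits.
--
--     Args:
--         action: List of card values (e.g., [3, 3] for a pair of 3s)
--         player_hand_with_suits: List of (card_value, suit) tuples
--
--     Returns:
--         Space-separated string of card suits (e.g., 'S3 H3')
--     """
--     if action == [] or action == "pass":
--         return "pass"
--
--     result = []
--     temp_hand = player_hand_with_suits.copy()
--     for card in action:
--         for i, (hand_card, suit) in enumerate(temp_hand):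
--             if hand_card == card:
--                 result.append(suit)
--                 temp_hand.pop(i)
--                 break
--     return " ".join(result)
-- ===== SOURCE B (Python) =====
-- def _action_to_suit_format(action, player_hand_with_suits):
--     """Convert action to suit format using pre-assigned suits.
--
--     No consumption/removal: group the hand's suits per value once (immutable
--     lists), then for each action card take the k-th suit of that value, where
--     k is how many times that value has already appeared in the action.
--     """
--     if action == [] or action == "pass":
--         return "pass"
--
--     groups = {}
--     for value, suit in player_hand_with_suits:
--         groups.setdefault(value, []).append(suit)
--
--     counts = {}
--     result = []
--     for card in action:
--         k = counts.get(card, 0)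
--         counts[card] = k + 1
--         suits = groups.get(card, ())
--         if k < len(suits):
--             result.append(suits[k])
--     return " ".join(result)
-- ===== Notes on version B (the rewrite author's own statement) =====
-- stated objective: faster
-- what changed: Instead of repeatedly scanning and destructively removing the first matching card from a copied hand, B never consumes anything: it groups the hand's suits per value once and serves the k-th occurrence of each value in the action by direct index k into that immutable list, k tracked by an occurrence counter.
import Mathlib
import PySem

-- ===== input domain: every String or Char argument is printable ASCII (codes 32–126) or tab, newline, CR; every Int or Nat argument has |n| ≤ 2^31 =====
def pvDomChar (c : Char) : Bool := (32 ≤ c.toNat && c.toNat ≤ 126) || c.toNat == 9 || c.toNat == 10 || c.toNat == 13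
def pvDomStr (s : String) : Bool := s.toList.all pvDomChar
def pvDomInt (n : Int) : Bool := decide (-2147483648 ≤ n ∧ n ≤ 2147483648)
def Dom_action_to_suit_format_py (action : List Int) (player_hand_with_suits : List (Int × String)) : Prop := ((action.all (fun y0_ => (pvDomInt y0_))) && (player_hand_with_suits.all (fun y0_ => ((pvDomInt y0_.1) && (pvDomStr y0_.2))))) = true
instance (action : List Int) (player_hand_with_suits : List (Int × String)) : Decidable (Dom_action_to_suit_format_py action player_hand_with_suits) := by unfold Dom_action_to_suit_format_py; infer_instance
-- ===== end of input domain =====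

-- B never consumes the hand: it groups suits per value once and serves the k-th occurrence
-- of each action value by index into that immutable list (objective: faster; return value only,
-- neither side mutates its input).

-- ===== PORT A =====
-- inner 'for i, (hand_card, suit) in enumerate(temp_hand): if hand_card == card: ... pop(i); break'
-- = find the first pair with matching value, return its suit and the hand with that pair removed
def pvScanPop (temp_hand : List (Int × String)) (card : Int) : Option (String × List (Int × String)) :=
  match temp_hand with
  | [] => none
  | (hand_card, suit) :: rest =>
    if hand_card == card then some (suit, rest)
    else match pvScanPop rest card with
      | none => none
      | some (s, rest') => some (s, (hand_card, suit) :: rest')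

def pvALoop (action : List Int) (temp_hand : List (Int × String)) : List String :=
  match action with
  | [] => []
  | card :: cards =>
    match pvScanPop temp_hand card with
    | none => pvALoop cards temp_hand
    | some (suit, rest) => suit :: pvALoop cards rest

def action_to_suit_format_py (action : List Int) (player_hand_with_suits : List (Int × String)) : String :=
  -- action is a list of ints, so Python's 'action == "pass"' is always False here
  if action == ([] : List Int) then "pass"
  else PySem.Str.join " " (pvALoop action player_hand_with_suits)

-- ===== PORT B =====
-- groups: value -> list of its suits in hand order, built once (never modified afterwards)
def pvGroups (player_hand_with_suits : List (Int × String)) : PySem.Dict Int (List String) :=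
  player_hand_with_suits.foldl (fun d p => d.modify p.1 [] (· ++ [p.2])) PySem.Dict.empty

-- counts: value -> how many times it has appeared in the action so far
def pvBLoop (action : List Int) (groups : PySem.Dict Int (List String))
    (counts : PySem.Dict Int Nat) : List String :=
  match action with
  | [] => []
  | card :: cards =>
    let k := counts.getD card 0
    let counts' := counts.insert card (k + 1)
    let suits := groups.getD card []
    if k < suits.length then suits.getD k "" :: pvBLoop cards groups counts'
    else pvBLoop cards groups counts'

def action_to_suit_format_py_alt (action : List Int) (player_hand_with_suits : List (Int × String)) : String :=
  if action == ([] : List Int) then "pass"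
  else PySem.Str.join " " (pvBLoop action (pvGroups player_hand_with_suits) PySem.Dict.empty)

-- ===== PRECONDITION & SPEC =====
def Spec_action_to_suit_format_py (action : List Int) (player_hand_with_suits : List (Int × String)) (out : String) : Prop := out = action_to_suit_format_py_alt action player_hand_with_suits
instance (action : List Int) (player_hand_with_suits : List (Int × String)) (out : String) : Decidable (Spec_action_to_suit_format_py action player_hand_with_suits out) := by unfold Spec_action_to_suit_format_py; infer_instance

-- ===== CLAIM =====
def Claim_equal_action_to_suit_format_py : Prop := ∀ (action : List Int) (player_hand_with_suits : List (Int × String)), Dom_action_to_suit_format_py action player_hand_with_suits → Spec_action_to_suit_format_py action player_hand_with_suits (action_to_suit_format_py action player_hand_with_suits)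

-- ===== LEMMAS AND PROOFS =====

-- the suits of a given value, in hand order
def pvSuits (v : Int) (h : List (Int × String)) : List String :=
  (h.filter (fun p => p.1 == v)).map Prod.snd

theorem pvScanPop_none (h : List (Int × String)) (c : Int) (hn : pvSuits c h = []) :
    pvScanPop h c = none := by
  induction h with
  | nil => rfl
  | cons p t ih =>
    obtain ⟨v, s⟩ := p
    simp only [pvSuits, List.filter_cons] at hn
    by_cases hv : v == c
    · simp [hv] at hn
    · simp only [hv] at hn
      simp [pvScanPop, hv, ih hn]

theorem pvScanPop_some (h : List (Int × String)) (c : Int) (s : String) (rest : List String)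
    (hs : pvSuits c h = s :: rest) :
    ∃ h', pvScanPop h c = some (s, h') ∧
      ∀ v, pvSuits v h' = if v = c then rest else pvSuits v h := by
  induction h with
  | nil => simp [pvSuits] at hs
  | cons p t ih =>
    obtain ⟨pv, ps⟩ := p
    by_cases hv : pv == c
    · have hvc : pv = c := by simpa using hv
      simp only [pvSuits, List.filter_cons, hv, if_pos, List.map_cons, List.cons.injEq] at hs
      obtain ⟨hps, hrest⟩ := hs
      refine ⟨t, by simp [pvScanPop, hv, hps], fun v => ?_⟩
      by_cases hveq : v = c
      · subst hveq; rw [if_pos rfl, ← hrest]; rfl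
      · rw [if_neg hveq]
        simp [pvSuits, show (pv == v) = false by
          simp [hvc]; exact fun h => (hveq h.symm).elim]
    · simp only [pvSuits, List.filter_cons, hv, Bool.false_eq_true, if_false] at hs
      obtain ⟨h', hscan, hinv⟩ := ih hs
      refine ⟨(pv, ps) :: h', by simp [pvScanPop, hv, hscan], fun v => ?_⟩
      by_cases hveq : v = c
      · subst hveq
        simp only [pvSuits, List.filter_cons, hv]
        have := hinv v; rw [if_pos rfl] at this
        simpa [pvSuits] using this
      · rw [if_neg hveq]
        simp only [pvSuits, List.filter_cons]
        have := hinv v; rw [if_neg hveq] at this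
        by_cases hpv : pv == v <;> simp [hpv] <;> simpa [pvSuits] using this

theorem pvGroups_getD (h : List (Int × String)) (v : Int) :
    (pvGroups h).getD v [] = pvSuits v h := by
  unfold pvGroups pvSuits
  rw [PySem.Dict.getD_foldl_modify_append]
  simp

-- invariant: A's remaining hand carries, for every value v, exactly the suits of v
-- in the original hand with the first (counts v) ones dropped
theorem pvLoop_eq (action : List Int) (h : List (Int × String))
    (G : PySem.Dict Int (List String)) (counts : PySem.Dict Int Nat)
    (hinv : ∀ v, pvSuits v h = (G.getD v []).drop (counts.getD v 0)) :
    pvALoop action h = pvBLoop action G counts := by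
  induction action generalizing h counts with
  | nil => rfl
  | cons c cs ih =>
    have hc := hinv c
    rw [pvALoop, pvBLoop]
    by_cases hk : counts.getD c 0 < (G.getD c []).length
    · rw [List.drop_eq_getElem_cons hk] at hc
      obtain ⟨h', hscan, hinv'⟩ := pvScanPop_some h c _ _ hc
      rw [hscan, if_pos hk]
      have hgetD : (G.getD c []).getD (counts.getD c 0) "" = (G.getD c [])[counts.getD c 0] := by
        rw [List.getD_eq_getElem?_getD, List.getElem?_eq_getElem hk]; rfl
      rw [hgetD]
      refine congrArg (_ :: ·) (ih h' _ fun v => ?_)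
      rw [hinv' v, PySem.Dict.getD_insert]
      split_ifs with hveq
      · subst hveq; rfl
      · exact hinv v
    · have hnil : pvSuits c h = [] := by
        rw [hc, List.drop_eq_nil_of_le (le_of_not_gt hk)]
      rw [pvScanPop_none h c hnil, if_neg hk]
      refine ih h _ fun v => ?_
      rw [PySem.Dict.getD_insert]
      split_ifs with hveq
      · subst hveq
        rw [hnil.symm, hnil, eq_comm, List.drop_eq_nil_iff]
        omega
      · exact hinv v

-- ===== VERDICT =====
theorem action_to_suit_format_py_spec : Claim_equal_action_to_suit_format_py := by
  intro action hand _
  unfold Spec_action_to_suit_format_py action_to_suit_format_py action_to_suit_format_py_alt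
  by_cases ha : action == ([] : List Int)
  · simp [ha]
  · simp only [ha]
    rw [pvLoop_eq action hand (pvGroups hand) PySem.Dict.empty
      (fun v => by rw [pvGroups_getD]; rfl)]
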